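-- pv_equiv track=rewrite | github.com/durrantmm/mustache | flank_assembler.py | get_simple_alignment_score
-- ===== SOURCE A (Python) =====
-- def get_simple_alignment_score(read1, read2):
--     score = 0
--     for i in range(min([len(read1), len(read2)])):
--         if read1[i] == read2[i]:
--             score += 1
--         else:
--             score -= 1
--
--     return (score)
-- ===== SOURCE B (Python) =====
-- def get_simple_alignment_score(read1, read2):
--     n = min(len(read1), len(read2))
--     score = 0
--     i = 0
--     while i < n:
--         j = i
--         while j < n and read1[j] == read2[j]:
--             j += 1
--         score += j - i          # length of this run of matches
--         if j < n:
--             score -= 1          # the mismatch that ended the run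
--             j += 1
--         i = j
--     return score
-- ===== Notes on version B (the rewrite author's own statement) =====
-- stated objective: alternative
-- what changed: B replaces A's per-index +1/-1 accumulator loop by a run-length scan: an outer while loop walks over maximal runs of matching characters, an inner while loop finds the end of each run, and the score is accumulated as run length minus one per terminating mismatch.
import Mathlib
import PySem

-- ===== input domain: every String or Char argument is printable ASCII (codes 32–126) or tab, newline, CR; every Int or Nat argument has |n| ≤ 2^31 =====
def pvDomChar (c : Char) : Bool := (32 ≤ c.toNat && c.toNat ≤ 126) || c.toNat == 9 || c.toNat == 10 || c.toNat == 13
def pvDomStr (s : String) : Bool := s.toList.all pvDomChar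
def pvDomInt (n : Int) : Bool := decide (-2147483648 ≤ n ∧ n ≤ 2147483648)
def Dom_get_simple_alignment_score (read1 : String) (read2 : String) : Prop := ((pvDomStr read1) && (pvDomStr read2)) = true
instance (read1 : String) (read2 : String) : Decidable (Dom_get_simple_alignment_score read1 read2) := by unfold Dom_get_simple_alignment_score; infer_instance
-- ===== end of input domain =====

-- B replaces A's per-index +1/-1 accumulator loop by a run-length scan: an outer loop
-- over maximal runs of matching characters (inner loop finds each run's end), adding the
-- run length and subtracting one per terminating mismatch; alternative decomposition, same cost.

-- ===== PORT A =====
-- literal port: score = 0; for i in range(min([len(r1), len(r2)])): if r1[i]==r2[i] then +1 else -1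
def get_simple_alignment_score (read1 : String) (read2 : String) : Int :=
  (PySem.List.pyRange 0 (min (read1.toList.length : Int) (read2.toList.length : Int)) 1).foldl
    (fun score i =>
      if PySem.Str.pyGet? read1 i = PySem.Str.pyGet? read2 i then score + 1 else score - 1)
    0

-- ===== PORT B =====
-- inner while loop of Source B: advance j while j < n and read1[j] == read2[j]
def pvRunEnd (read1 read2 : String) (n : Nat) (j : Nat) : Nat :=
  if h : j < n ∧ PySem.Str.pyGet? read1 (j : Int) = PySem.Str.pyGet? read2 (j : Int) then
    pvRunEnd read1 read2 n (j + 1)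
  else j
termination_by n - j
decreasing_by omega

-- pvRunEnd never moves backwards (needed for the outer loop's termination)
theorem pvRunEnd_ge (read1 read2 : String) (n : Nat) :
    ∀ j : Nat, j ≤ pvRunEnd read1 read2 n j := by
  intro j
  induction j using pvRunEnd.induct read1 read2 n with
  | case1 j h ih => rw [pvRunEnd, dif_pos h]; omega
  | case2 j h => rw [pvRunEnd, dif_neg h]

-- outer while loop of Source B: score += j - i; if j < n: score -= 1; j += 1; i = j
def pvRunScan (read1 read2 : String) (n : Nat) (i : Nat) : Int :=
  if i < n then
    if pvRunEnd read1 read2 n i < n then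
      ((pvRunEnd read1 read2 n i : Int) - (i : Int) - 1)
        + pvRunScan read1 read2 n (pvRunEnd read1 read2 n i + 1)
    else (pvRunEnd read1 read2 n i : Int) - (i : Int)
  else 0
termination_by n - i
decreasing_by
  have := pvRunEnd_ge read1 read2 n i
  omega

-- literal port of Source B: n = min(len(read1), len(read2)); run-length scan from i = 0
def get_simple_alignment_score_alt (read1 : String) (read2 : String) : Int :=
  pvRunScan read1 read2 (min read1.toList.length read2.toList.length) 0

-- ===== PRECONDITION & SPEC =====
def Spec_get_simple_alignment_score (read1 : String) (read2 : String) (out : Int) : Prop := out = get_simple_alignment_score_alt read1 read2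
instance (read1 : String) (read2 : String) (out : Int) : Decidable (Spec_get_simple_alignment_score read1 read2 out) := by unfold Spec_get_simple_alignment_score; infer_instance

-- ===== CLAIM (what is proved, stated in full; the proofs are below) =====
def Claim_equal_get_simple_alignment_score : Prop := ∀ (read1 : String) (read2 : String), Dom_get_simple_alignment_score read1 read2 → Spec_get_simple_alignment_score read1 read2 (get_simple_alignment_score read1 read2)

-- ===== LEMMAS AND PROOFS =====

-- the ±1 contribution of position k (shared vocabulary of the two proofs)
def pvG (read1 read2 : String) (k : Nat) : Int :=
  if PySem.Str.pyGet? read1 (k : Int) = PySem.Str.pyGet? read2 (k : Int) then 1 else -1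

-- a ±1 fold is its start plus the sum of the ±1 contributions
theorem pv_foldl_pm {α : Type} (p : α → Prop) [DecidablePred p] :
    ∀ (L : List α) (a : Int),
      L.foldl (fun s x => if p x then s + 1 else s - 1) a
        = a + (L.map (fun x => if p x then (1 : Int) else -1)).sum := by
  intro L
  induction L with
  | nil => intro a; simp
  | cons x t ih =>
    intro a
    simp only [List.foldl_cons, List.map_cons, List.sum_cons, ih]
    split_ifs <;> ring

theorem pvRunEnd_le (read1 read2 : String) (n : Nat) :
    ∀ j : Nat, j ≤ n → pvRunEnd read1 read2 n j ≤ n := by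
  intro j
  induction j using pvRunEnd.induct read1 read2 n with
  | case1 j h ih => intro _; rw [pvRunEnd, dif_pos h]; exact ih (by omega)
  | case2 j h => intro hj; rw [pvRunEnd, dif_neg h]; exact hj

-- every position strictly inside the run matches
theorem pvRunEnd_run (read1 read2 : String) (n : Nat) :
    ∀ j : Nat, ∀ k : Nat, j ≤ k → k < pvRunEnd read1 read2 n j →
      PySem.Str.pyGet? read1 (k : Int) = PySem.Str.pyGet? read2 (k : Int) := by
  intro j
  induction j using pvRunEnd.induct read1 read2 n with
  | case1 j h ih =>
    intro k hk hk'
    rw [pvRunEnd, dif_pos h] at hk'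
    rcases Nat.eq_or_lt_of_le hk with rfl | hlt
    · exact h.2
    · exact ih k hlt hk'
  | case2 j h =>
    intro k hk hk'
    rw [pvRunEnd, dif_neg h] at hk'
    omega

-- if the run ends before n, the ending position is a mismatch
theorem pvRunEnd_stop (read1 read2 : String) (n : Nat) :
    ∀ j : Nat, pvRunEnd read1 read2 n j < n →
      PySem.Str.pyGet? read1 ((pvRunEnd read1 read2 n j : Nat) : Int)
        ≠ PySem.Str.pyGet? read2 ((pvRunEnd read1 read2 n j : Nat) : Int) := by
  intro j
  induction j using pvRunEnd.induct read1 read2 n with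
  | case1 j h ih =>
    rw [pvRunEnd, dif_pos h]
    exact ih
  | case2 j h =>
    rw [pvRunEnd, dif_neg h]
    intro hlt heq
    exact h ⟨hlt, heq⟩

-- sum of pvG over an all-matching range is its length
theorem pv_sum_ones (read1 read2 : String) (i m : Nat)
    (h : ∀ k, k ∈ List.range' i m → pvG read1 read2 k = 1) :
    ((List.range' i m).map (pvG read1 read2)).sum = (m : Int) := by
  rw [List.map_congr_left h]
  simp

-- the run scan computes the suffix sum of the ±1 contributions
theorem pvRunScan_eq_sum (read1 read2 : String) (n : Nat) :
    ∀ i : Nat, i ≤ n →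
      pvRunScan read1 read2 n i = ((List.range' i (n - i)).map (pvG read1 read2)).sum := by
  intro i
  induction i using pvRunScan.induct read1 read2 n with
  | case1 i hi hj ih =>
    intro _
    rw [pvRunScan, if_pos hi, if_pos hj]
    set j := pvRunEnd read1 read2 n i with hjdef
    have hge := pvRunEnd_ge read1 read2 n i
    rw [← hjdef] at hge
    -- split [i, n) into [i, j) ++ [j] ++ [j+1, n)
    have hsplit : List.range' i (n - i) =
        List.range' i (j - i) ++ j :: List.range' (j + 1) (n - (j + 1)) := by
      have h1 : j :: List.range' (j + 1) (n - (j + 1)) = List.range' j (n - j) := by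
        have : n - j = (n - (j + 1)) + 1 := by omega
        rw [this, List.range'_succ]
      rw [h1]
      have h2 : List.range' i (j - i) 1 ++ List.range' (i + 1 * (j - i)) (n - j) 1
          = List.range' i ((j - i) + (n - j)) 1 := List.range'_append
      have h3 : i + 1 * (j - i) = j := by omega
      have h4 : (j - i) + (n - j) = n - i := by omega
      rw [h3, h4] at h2
      exact h2.symm
    rw [hsplit, List.map_append, List.sum_append, List.map_cons, List.sum_cons]
    rw [pv_sum_ones read1 read2 i (j - i) ?_, ih (by omega)]
    · have hg : pvG read1 read2 j = -1 := by
        have hstop := pvRunEnd_stop read1 read2 n i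
        rw [← hjdef] at hstop
        simp only [pvG, if_neg (hstop hj)]
      rw [hg]
      omega
    · intro k hk
      rw [List.mem_range'] at hk
      obtain ⟨r, hr, hke⟩ := hk
      have hrun := pvRunEnd_run read1 read2 n i k (by omega) (by rw [← hjdef]; omega)
      simp only [pvG, if_pos hrun]
  | case2 i hi hjn =>
    intro hin
    rw [pvRunScan, if_pos hi, if_neg hjn]
    set j := pvRunEnd read1 read2 n i with hjdef
    have hle := pvRunEnd_le read1 read2 n i (by omega)
    rw [← hjdef] at hle
    have hjn' : j = n := by omega
    rw [pv_sum_ones read1 read2 i (n - i) ?_]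
    · rw [hjn']
      omega
    · intro k hk
      rw [List.mem_range'] at hk
      obtain ⟨r, hr, hke⟩ := hk
      have hrun := pvRunEnd_run read1 read2 n i k (by omega) (by rw [← hjdef]; omega)
      simp only [pvG, if_pos hrun]
  | case3 i hi =>
    intro hin
    rw [pvRunScan, if_neg hi]
    have h0 : n - i = 0 := by omega
    simp [h0]

theorem get_simple_alignment_score_eq (read1 read2 : String) :
    get_simple_alignment_score read1 read2 = get_simple_alignment_score_alt read1 read2 := by
  unfold get_simple_alignment_score get_simple_alignment_score_alt
  set n := min read1.toList.length read2.toList.length with hn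
  rw [PySem.List.pyRange_one]
  have hnn : ((min (read1.toList.length : Int) (read2.toList.length : Int) - 0).toNat) = n := by
    omega
  rw [List.foldl_map, hnn]
  rw [pv_foldl_pm
    (fun k : Nat => PySem.Str.pyGet? read1 ((0 : Int) + k) = PySem.Str.pyGet? read2 ((0 : Int) + k))
    (List.range n) 0]
  rw [pvRunScan_eq_sum read1 read2 n 0 (by omega)]
  rw [List.range_eq_range']
  simp only [Nat.sub_zero, zero_add]
  rfl

-- ===== VERDICT (by name: the statement is the Claim_ definition above) =====
theorem get_simple_alignment_score_spec : Claim_equal_get_simple_alignment_score := by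
  intro read1 read2 _
  unfold Spec_get_simple_alignment_score
  exact get_simple_alignment_score_eq read1 read2
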